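-- pv_equiv track=rewrite | github.com/diogomr/aoc-2024 | day04/main.py | is_two_max
-- ===== SOURCE A (Python) =====
-- def is_two_max(map, x, y):
--     if map[x][y] != "A":
--         return False
--
--     possible_dirs = [
--         {(1, -1): "M", (-1, -1): "M", (1, 1): "S", (-1, 1): "S"},
--         {(1, -1): "S", (-1, -1): "M", (1, 1): "S", (-1, 1): "M"},
--         {(1, -1): "S", (-1, -1): "S", (1, 1): "M", (-1, 1): "M"},
--         {(1, -1): "M", (-1, -1): "S", (1, 1): "M", (-1, 1): "S"},
--     ]
--
--     count = 0
--     for direction in possible_dirs: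
--         count += 1
--         for ((dx, dy), target) in direction.items():
--             if x + dx not in range(len(map)):
--                 count -= 1
--                 break
--             if y + dy not in range(len(map[x])):
--                 count -= 1
--                 break
--             if map[x + dx][y + dy] != target:
--                 count -= 1
--                 break
--
--     return count != 0
-- ===== SOURCE B (Python) =====
-- def is_two_max(map, x, y):
--     if map[x][y] != "A":
--         return False
--     if not (0 <= x - 1 and x + 1 < len(map) and 0 <= y - 1 and y + 1 < len(map[x])):
--         return False
--     a = map[x - 1][y - 1]
--     b = map[x + 1][y + 1]
--     c = map[x + 1][y - 1]
--     d = map[x - 1][y + 1]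
--     return ((a == "M" and b == "S") or (a == "S" and b == "M")) and \
--            ((c == "M" and d == "S") or (c == "S" and d == "M"))
-- ===== Notes on version B (the rewrite author's own statement) =====
-- stated objective: simpler
-- what changed: Replaces A's four corner-target dictionaries with count/break bookkeeping by one explicit bounds check plus a direct two-diagonal M/S-pair test.
-- outside the precondition, e.g. on is_two_max(['AB', 'Z'], 0, 0): A returns False, B returns False
import Mathlib
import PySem

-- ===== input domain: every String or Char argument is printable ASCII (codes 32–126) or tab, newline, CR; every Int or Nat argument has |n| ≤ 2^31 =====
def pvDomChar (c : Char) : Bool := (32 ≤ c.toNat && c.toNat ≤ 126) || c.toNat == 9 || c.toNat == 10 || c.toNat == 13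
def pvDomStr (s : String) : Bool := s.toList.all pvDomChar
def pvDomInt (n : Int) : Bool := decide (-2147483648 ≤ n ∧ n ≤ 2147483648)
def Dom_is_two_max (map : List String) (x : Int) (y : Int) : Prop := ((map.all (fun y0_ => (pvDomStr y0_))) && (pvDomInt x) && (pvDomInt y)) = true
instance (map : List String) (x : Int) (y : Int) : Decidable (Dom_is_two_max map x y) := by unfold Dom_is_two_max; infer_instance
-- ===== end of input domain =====

-- B replaces A's four corner-target dictionaries and the count/break bookkeeping by an explicit
-- bounds check plus a direct two-diagonal {M,S}-pair test (objective: simpler).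

-- ===== PORT A =====
-- reads map[i][j] (Python semantics, negative wrap); none = IndexError
def pvRead (map : List String) (i j : Int) : Option Char :=
  (PySem.List.pyGet? map i).bind (fun r => PySem.Str.pyGet? r j)

-- len(map[x]) as used by A's y-bound check (value irrelevant when map[x] raises: excluded by Pre_)
def pvRowLen (map : List String) (x : Int) : Int :=
  match PySem.List.pyGet? map x with
  | some r => (r.toList.length : Int)
  | none => 0

-- the inner 'for ((dx,dy), target) in direction.items()' loop with its breaks: count -= 1 on break
def pvDirCheck (map : List String) (x y : Int) (items : List ((Int × Int) × Char)) (count : Int) : Int :=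
  match items with
  | [] => count
  | ((dx, dy), target) :: rest =>
    if ¬ (0 ≤ x + dx ∧ x + dx < (map.length : Int)) then count - 1
    else if ¬ (0 ≤ y + dy ∧ y + dy < pvRowLen map x) then count - 1
    else
      match pvRead map (x + dx) (y + dy) with
      | none => count - 1   -- IndexError; Pre_ excludes reaching this
      | some ch => if ch ≠ target then count - 1 else pvDirCheck map x y rest count

def is_two_max (map : List String) (x : Int) (y : Int) : Bool :=
  match pvRead map x y with
  | none => false   -- IndexError; Pre_ excludes
  | some c =>
    if c ≠ 'A' then false
    else
      let possible_dirs : List (List ((Int × Int) × Char)) :=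
        [ [((1, -1), 'M'), ((-1, -1), 'M'), ((1, 1), 'S'), ((-1, 1), 'S')],
          [((1, -1), 'S'), ((-1, -1), 'M'), ((1, 1), 'S'), ((-1, 1), 'M')],
          [((1, -1), 'S'), ((-1, -1), 'S'), ((1, 1), 'M'), ((-1, 1), 'M')],
          [((1, -1), 'M'), ((-1, -1), 'S'), ((1, 1), 'M'), ((-1, 1), 'S')] ]
      let count := possible_dirs.foldl (fun count direction => pvDirCheck map x y direction (count + 1)) 0
      decide (count ≠ 0)

-- ===== PORT B =====
def is_two_max_alt (map : List String) (x : Int) (y : Int) : Bool :=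
  match pvRead map x y with
  | none => false   -- IndexError; Pre_ excludes
  | some c0 =>
    if c0 ≠ 'A' then false
    else if ¬ (0 ≤ x - 1 ∧ x + 1 < (map.length : Int) ∧ 0 ≤ y - 1 ∧ y + 1 < pvRowLen map x) then false
    else
      let a := (pvRead map (x - 1) (y - 1)).getD ' '   -- in range under Pre_
      let b := (pvRead map (x + 1) (y + 1)).getD ' '
      let c := (pvRead map (x + 1) (y - 1)).getD ' '
      let d := (pvRead map (x - 1) (y + 1)).getD ' '
      ((a = 'M' && b = 'S') || (a = 'S' && b = 'M')) &&
      ((c = 'M' && d = 'S') || (c = 'S' && d = 'M'))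

-- ===== PRECONDITION & SPEC =====
-- Pre_ excludes inputs where map[x][y] itself raises IndexError, and ragged grids whose cell (x,y)
-- is 'A' — there A can raise IndexError reading a neighbour row shorter than row x (when it happens
-- not to reach such a read, e.g. at a border, both programs return False anyway).
def Pre_is_two_max (map : List String) (x : Int) (y : Int) : Prop :=
  PySem.Raise.InRange map.length x ∧
  PySem.Raise.InRange ((PySem.List.pyGet? map x).getD "").toList.length y ∧
  (pvRead map x y = some 'A' → ∀ s ∈ map, s.toList.length = ((PySem.List.pyGet? map x).getD "").toList.length)
instance (map : List String) (x : Int) (y : Int) : Decidable (Pre_is_two_max map x y) := by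
  unfold Pre_is_two_max; infer_instance

def pvWitness_is_two_max : List String × Int × Int := (["M.S", ".A.", "M.S"], 1, 1)

def Spec_is_two_max (map : List String) (x : Int) (y : Int) (out : Bool) : Prop := out = is_two_max_alt map x y
instance (map : List String) (x : Int) (y : Int) (out : Bool) : Decidable (Spec_is_two_max map x y out) := by unfold Spec_is_two_max; infer_instance

-- ===== CLAIM (what is proved, stated in full; the proofs are below) =====
def Claim_equal_is_two_max : Prop := ∀ (map : List String) (x : Int) (y : Int), Dom_is_two_max map x y → Pre_is_two_max map x y → Spec_is_two_max map x y (is_two_max map x y)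

-- ===== LEMMAS AND PROOFS =====

-- one corner test as a Bool: both bound checks pass and the read char equals the target
def pvChk (map : List String) (x y : Int) (p : (Int × Int) × Char) : Bool :=
  decide (0 ≤ x + p.1.1 ∧ x + p.1.1 < (map.length : Int)) &&
  decide (0 ≤ y + p.1.2 ∧ y + p.1.2 < pvRowLen map x) &&
  (pvRead map (x + p.1.1) (y + p.1.2) == some p.2)

theorem pvDirCheck_eq (map : List String) (x y : Int) (items : List ((Int × Int) × Char)) (count : Int) :
    pvDirCheck map x y items count = if items.all (pvChk map x y) then count else count - 1 := by
  induction items generalizing count with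
  | nil => simp [pvDirCheck]
  | cons p rest ih =>
    obtain ⟨⟨dx, dy⟩, t⟩ := p
    simp only [pvDirCheck, List.all_cons]
    by_cases h1 : 0 ≤ x + dx ∧ x + dx < (map.length : Int)
    · by_cases h2 : 0 ≤ y + dy ∧ y + dy < pvRowLen map x
      · rw [if_neg (not_not_intro h1), if_neg (not_not_intro h2)]
        have e1 : pvChk map x y ((dx, dy), t) = (pvRead map (x + dx) (y + dy) == some t) := by
          simp [pvChk, h1, h2]
        simp only [e1]
        cases hr : pvRead map (x + dx) (y + dy) with
        | none => simp
        | some ch =>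
          by_cases ht : ch = t
          · subst ht
            rw [ih]
            have hm : (match some ch with
              | none => count - 1
              | some ch_1 => if ch_1 ≠ ch then count - 1 else if rest.all (pvChk map x y) = true then count else count - 1)
                = (if ch ≠ ch then count - 1 else if rest.all (pvChk map x y) = true then count else count - 1) := rfl
            rw [hm, if_neg (show ¬ ch ≠ ch from fun h => h rfl),
              show (some ch == some ch) = true from by simp, Bool.true_and]
          · simp [ht]
      · rw [if_neg (not_not_intro h1), if_pos h2]
        have : pvChk map x y ((dx, dy), t) = false := by simp [pvChk, h2]
        simp [this]
    · rw [if_pos h1]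
      have : pvChk map x y ((dx, dy), t) = false := by simp [pvChk, h1]
      simp [this]

-- ===== VERDICT (by name: the statement is the Claim_ definition above) =====
set_option maxHeartbeats 800000 in
theorem is_two_max_spec : Claim_equal_is_two_max := by
  unfold Claim_equal_is_two_max
  intro map x y _hdom hpre
  obtain ⟨hx, hy, hrect⟩ := hpre
  unfold Spec_is_two_max
  -- map[x] returns some row
  obtain ⟨row, hrow⟩ : ∃ r, PySem.List.pyGet? map x = some r := by
    cases h : PySem.List.pyGet? map x with
    | none => exact absurd hx ((PySem.List.pyGet?_eq_none_iff _ _).mp h)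
    | some r => exact ⟨r, rfl⟩
  rw [hrow] at hy hrect
  simp only [Option.getD_some] at hy hrect
  -- row[y] returns some c
  obtain ⟨c, hc⟩ : ∃ c, PySem.Str.pyGet? row y = some c := by
    cases h : PySem.Str.pyGet? row y with
    | none =>
      exfalso
      have h' : PySem.List.pyGet? row.toList y = none := by simpa using h
      exact absurd hy ((PySem.List.pyGet?_eq_none_iff _ _).mp h')
    | some c => exact ⟨c, rfl⟩
  have hread : pvRead map x y = some c := by simp [pvRead, hrow]; simpa using hc
  by_cases hA : c = 'A'
  case neg =>
    simp [is_two_max, is_two_max_alt, hread, hA]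
  case pos =>
    subst hA
    have hrect' := hrect hread
    have hL : pvRowLen map x = (row.toList.length : Int) := by simp [pvRowLen, hrow]
    by_cases hb : 0 ≤ x - 1 ∧ x + 1 < (map.length : Int) ∧ 0 ≤ y - 1 ∧ y + 1 < pvRowLen map x
    case pos =>
      obtain ⟨hb1, hb2, hb3, hb4⟩ := hb
      -- all four corner reads are in range: name their characters
      have hcorner : ∀ dx dy : Int, dx = 1 ∨ dx = -1 → dy = 1 ∨ dy = -1 →
          ∃ ch, pvRead map (x + dx) (y + dy) = some ch := by
        intro dx dy hdx hdy
        have hx' : 0 ≤ x + dx ∧ x + dx < (map.length : Int) := by rcases hdx with h | h <;> subst h <;> omega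
        obtain ⟨r, hr⟩ : ∃ r, PySem.List.pyGet? map (x + dx) = some r := by
          cases h : PySem.List.pyGet? map (x + dx) with
          | none => exact absurd h (by rw [PySem.List.pyGet?_eq_none_iff]; simp [PySem.Raise.InRange]; omega)
          | some r => exact ⟨r, rfl⟩
        have hrlen : (r.toList.length : Int) = (row.toList.length : Int) := by
          have := hrect' r (PySem.List.mem_of_pyGet?_eq_some _ hr)
          exact_mod_cast this
        have hy' : 0 ≤ y + dy ∧ y + dy < (r.toList.length : Int) := by
          rw [hrlen]; rw [hL] at hb4; rcases hdy with h | h <;> subst h <;> omega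
        obtain ⟨ch, hch⟩ : ∃ ch, PySem.Str.pyGet? r (y + dy) = some ch := by
          cases h : PySem.Str.pyGet? r (y + dy) with
          | none =>
            have h' : PySem.List.pyGet? r.toList (y + dy) = none := by simpa using h
            refine absurd h' ?_
            rw [PySem.List.pyGet?_eq_none_iff]
            have hel : r.toList.length = r.length := by simp
            simp only [PySem.Raise.InRange, not_not, not_forall, not_lt, not_le]
            simp [PySem.Raise.InRange] at *
            omega
          | some ch => exact ⟨ch, rfl⟩
        exact ⟨ch, by simp [pvRead, hr]; simpa using hch⟩
      obtain ⟨chA, hA⟩ := hcorner (-1) (-1) (Or.inr rfl) (Or.inr rfl)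
      obtain ⟨chB, hB⟩ := hcorner 1 1 (Or.inl rfl) (Or.inl rfl)
      obtain ⟨chC, hC⟩ := hcorner 1 (-1) (Or.inl rfl) (Or.inr rfl)
      obtain ⟨chD, hD⟩ := hcorner (-1) 1 (Or.inr rfl) (Or.inl rfl)
      have hxm : 0 ≤ x + (-1) ∧ x + (-1) < (map.length : Int) := by omega
      have hxp : 0 ≤ x + 1 ∧ x + 1 < (map.length : Int) := by omega
      have hym : 0 ≤ y + (-1) ∧ y + (-1) < pvRowLen map x := by rw [hL] at hb4 ⊢; omega
      have hyp : 0 ≤ y + 1 ∧ y + 1 < pvRowLen map x := by rw [hL] at hb4 ⊢; omega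
      have hxm' : x - 1 = x + (-1) := by ring
      have hyn' : y - 1 = y + (-1) := by ring
      simp only [is_two_max, is_two_max_alt, hread, pvDirCheck_eq, hxm', hyn',
        List.foldl_cons, List.foldl_nil, List.all_cons, List.all_nil, pvChk,
        hA, hB, hC, hD, hxm, hxp, hym, hyp, decide_true, and_self,
        not_true_eq_false, if_false, Bool.true_and, Bool.and_true,
        Option.getD_some, Option.some.injEq, beq_iff_eq, ite_not]
      simp only [show ¬('A' ≠ 'A') from by simp, if_false, decide_eq_true_eq, if_true,
        reduceIte]
      have hsome : ∀ u v : Char, (some u == some v) = decide (u = v) := fun u v => by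
        cases h : decide (u = v) <;> simp_all
      simp only [hsome]
      generalize decide (chA = 'M') = aM
      generalize decide (chA = 'S') = aS
      generalize decide (chB = 'M') = bM
      generalize decide (chB = 'S') = bS
      generalize decide (chC = 'M') = cM
      generalize decide (chC = 'S') = cS
      generalize decide (chD = 'M') = dM
      generalize decide (chD = 'S') = dS
      revert aM aS bM bS cM cS dM dS
      decide
    case neg =>
      -- some bound fails: every direction breaks, A's count is 0; B returns false directly
      have hnb : ¬ (0 ≤ x - 1) ∨ ¬ (x + 1 < (map.length : Int)) ∨ ¬ (0 ≤ y - 1) ∨ ¬ (y + 1 < pvRowLen map x) := by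
        by_contra h; push_neg at h; exact hb ⟨h.1, h.2.1, h.2.2.1, h.2.2.2⟩
      have hkill : ∀ t₁ t₂ t₃ t₄ : Char,
          List.all [(((1 : Int), (-1 : Int)), t₁), ((-1, -1), t₂), ((1, 1), t₃), ((-1, 1), t₄)]
            (pvChk map x y) = false := by
        intro t₁ t₂ t₃ t₄
        simp only [List.all_cons, List.all_nil, Bool.and_true]
        rcases hnb with h | h | h | h
        · have : pvChk map x y ((-1, -1), t₂) = false := by
            unfold pvChk; rw [decide_eq_false (show ¬ (0 ≤ x + (-1) ∧ x + (-1) < (map.length : Int)) from by omega)]; simp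
          simp [this]
        · have : pvChk map x y ((1, -1), t₁) = false := by
            unfold pvChk; rw [decide_eq_false (show ¬ (0 ≤ x + 1 ∧ x + 1 < (map.length : Int)) from by omega)]; simp
          simp [this]
        · have : pvChk map x y ((1, -1), t₁) = false := by
            unfold pvChk
            rw [decide_eq_false (show ¬ (0 ≤ y + (-1) ∧ y + (-1) < pvRowLen map x) from by omega)]
            simp
          simp [this]
        · have : pvChk map x y ((1, 1), t₃) = false := by
            unfold pvChk
            rw [decide_eq_false (show ¬ (0 ≤ y + 1 ∧ y + 1 < pvRowLen map x) from by omega)]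
            simp
          simp [this]
      simp only [is_two_max, is_two_max_alt, hread, pvDirCheck_eq, List.foldl_cons, List.foldl_nil,
        hkill, if_false, Bool.false_eq_true, not_false_eq_true, if_true, if_pos hb]
      norm_num
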